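-- pv_equiv track=rewrite | github.com/Brychlikov/matura_solutions | 2020/zad4.py | zad43
-- ===== SOURCE A (Python) =====
-- from collections import Counter
--
-- def zad43(l):
--     luki = [abs(x - y) for x, y in zip(l[:-1], l[1:])]
--     c = Counter(luki)
--     counts = c.most_common()
--     result = []
--     best = counts[0][1]
--     for el in counts:
--         if el[1] != best:
--             break
--         result.append(el)
--     return result
-- ===== SOURCE B (Python) =====
-- def zad43(l):
--     counts = {}
--     for x, y in zip(l, l[1:]):
--         g = abs(y - x)
--         counts[g] = counts.get(g, 0) + 1
--     best = max(counts.values())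
--     return [(k, v) for k, v in counts.items() if v == best]
-- ===== Notes on version B (the rewrite author's own statement) =====
-- stated objective: alternative
-- what changed: B replaces A's full sort of the Counter (most_common) plus break-prefix walk by a single dict-building pass over zip(l, l[1:]) followed by computing the maximum count and filtering the table in one comprehension; no sort is performed.
import Mathlib
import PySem

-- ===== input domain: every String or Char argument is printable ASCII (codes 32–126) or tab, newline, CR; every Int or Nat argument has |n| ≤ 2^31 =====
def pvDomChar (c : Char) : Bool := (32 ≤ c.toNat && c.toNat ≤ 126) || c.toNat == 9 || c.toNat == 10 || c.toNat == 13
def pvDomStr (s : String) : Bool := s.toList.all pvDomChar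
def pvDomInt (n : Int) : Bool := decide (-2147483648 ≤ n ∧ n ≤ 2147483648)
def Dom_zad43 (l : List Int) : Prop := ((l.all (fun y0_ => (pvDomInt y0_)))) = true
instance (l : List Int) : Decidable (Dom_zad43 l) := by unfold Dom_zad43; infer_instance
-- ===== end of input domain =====

-- B avoids A's sort of the Counter: it builds the gap-count dict in one pass and selects the
-- max-count entries by a single filter; equal return values are proved on lists of length ≥ 2.

-- ===== PORT A =====
-- the 'for el in counts: if el[1] != best: break; result.append(el)' loop
def pvTake_zad43 (best : Int) : List (Int × Int) → List (Int × Int)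
  | [] => []
  | el :: rest => if el.2 ≠ best then [] else el :: pvTake_zad43 best rest

def zad43 (l : List Int) : List (Int × Int) :=
  let luki := ((PySem.List.slice l none (some (-1))).zip (PySem.List.slice l (some 1) none)).map
      (fun p => |p.1 - p.2|)
  let c := PySem.Dict.counter luki
  let counts := PySem.List.sorted c.items (fun p => p.2) true   -- c.most_common()
  match counts with
  | [] => []                                   -- counts[0][1] raises IndexError: outside Pre_
  | el0 :: _ => pvTake_zad43 el0.2 counts

-- ===== PORT B =====
def zad43_alt (l : List Int) : List (Int × Int) :=
  let counts := (l.zip (PySem.List.slice l (some 1) none)).foldl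
      (fun d p => d.insert (|p.2 - p.1|) (d.getD (|p.2 - p.1|) 0 + 1)) PySem.Dict.empty
  match PySem.List.max? counts.values (fun v => v) with
  | some best => counts.items.filter (fun p => p.2 == best)
  | none => []                                 -- max() raises ValueError: outside Pre_

-- ===== PRECONDITION & SPEC =====
-- Pre_ excludes lists with fewer than two elements: there are no gaps, so A raises IndexError
-- (counts[0]) and B raises ValueError (max of an empty sequence).
def Pre_zad43 (l : List Int) : Prop := 2 ≤ l.length
instance (l : List Int) : Decidable (Pre_zad43 l) := by unfold Pre_zad43; infer_instance
def pvWitness_zad43 : List Int := [1, 3, 6, 4]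
def Spec_zad43 (l : List Int) (out : List (Int × Int)) : Prop := out = zad43_alt l
instance (l : List Int) (out : List (Int × Int)) : Decidable (Spec_zad43 l out) := by unfold Spec_zad43; infer_instance

-- ===== CLAIM (what is proved, stated in full; the proofs are below) =====
def Claim_equal_zad43 : Prop := ∀ (l : List Int), Dom_zad43 l → Pre_zad43 l → Spec_zad43 l (zad43 l)

-- ===== LEMMAS AND PROOFS =====

lemma pvFilterNil {α : Type} (key : α → Int) (v : Int) (s : List α)
    (h : ∀ y ∈ s, key y < v) : s.filter (fun a => key a == v) = [] := by
  rw [List.filter_eq_nil_iff]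
  intro a ha
  simpa using (h a ha).ne

lemma pvFilterInsertBy {α : Type} (key : α → Int) (v : Int) (x : α) (ys : List α)
    (hp : ys.Pairwise (fun a b => key b ≤ key a)) :
    (PySem.List.insertBy (fun a b => decide (key b < key a)) x ys).filter (fun a => key a == v)
      = if key x = v then ys.filter (fun a => key a == v) ++ [x]
        else ys.filter (fun a => key a == v) := by
  induction ys with
  | nil =>
    by_cases hx : key x = v <;> simp [PySem.List.insertBy, hx]
  | cons y t ih =>
    rw [List.pairwise_cons] at hp
    by_cases hlt : key y < key x
    · have he : PySem.List.insertBy (fun a b => decide (key b < key a)) x (y :: t) = x :: y :: t := by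
        simp [PySem.List.insertBy, hlt]
      rw [he]
      by_cases hx : key x = v
      · have hall : ∀ z ∈ y :: t, key z < v := by
          intro z hz
          rcases List.mem_cons.mp hz with hz | hz
          · exact hz ▸ hx ▸ hlt
          · exact lt_of_le_of_lt (hp.1 z hz) (hx ▸ hlt)
        rw [List.filter_cons_of_pos (by simpa using hx), pvFilterNil key v _ hall]
        simp [hx]
      · rw [List.filter_cons_of_neg (by simpa using hx)]
        simp [hx]
    · have he : PySem.List.insertBy (fun a b => decide (key b < key a)) x (y :: t)
          = y :: PySem.List.insertBy (fun a b => decide (key b < key a)) x t := by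
        simp [PySem.List.insertBy, hlt]
      rw [he, List.filter_cons, ih hp.2, List.filter_cons]
      by_cases hx : key x = v <;> by_cases hy : key y = v <;> simp [hx, hy]

lemma pvFilterSorted {α : Type} (key : α → Int) (v : Int) (xs : List α) :
    (PySem.List.sorted xs key true).filter (fun a => key a == v)
      = xs.filter (fun a => key a == v) := by
  induction xs using List.reverseRecOn with
  | nil => rfl
  | append_singleton xs x ih =>
    have h1 : PySem.List.sorted (xs ++ [x]) key true
        = PySem.List.insertBy (fun a b => decide (key b < key a)) x (PySem.List.sorted xs key true) := by
      rw [PySem.List.sorted_rev_eq_foldl_insertBy, PySem.List.sorted_rev_eq_foldl_insertBy,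
          List.foldl_append]
      rfl
    rw [h1, pvFilterInsertBy key v x _ (PySem.List.sorted_pairwise_rev xs key)]
    by_cases hx : key x = v <;> simp [hx, ih]

lemma pvTakeWhileFilter {α : Type} (key : α → Int) (v : Int) (s : List α)
    (hp : s.Pairwise (fun a b => key b ≤ key a)) (hb : ∀ y ∈ s, key y ≤ v) :
    s.takeWhile (fun a => key a == v) = s.filter (fun a => key a == v) := by
  induction s with
  | nil => rfl
  | cons a t ih =>
    rw [List.pairwise_cons] at hp
    by_cases ha : key a = v
    · rw [List.takeWhile_cons_of_pos (by simpa using ha),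
          List.filter_cons_of_pos (by simpa using ha),
          ih hp.2 (fun y hy => hb y (List.mem_cons_of_mem a hy))]
    · have hav : key a < v := lt_of_le_of_ne (hb a List.mem_cons_self) ha
      have hall : ∀ y ∈ a :: t, key y < v := by
        intro y hy
        rcases List.mem_cons.mp hy with hy | hy
        · exact hy ▸ hav
        · exact lt_of_le_of_lt (hp.1 y hy) hav
      rw [List.takeWhile_cons_of_neg (by simpa using ha), pvFilterNil key v _ hall]

lemma pvTakeEq (best : Int) (s : List (Int × Int)) :
    pvTake_zad43 best s = s.takeWhile (fun a => a.2 == best) := by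
  induction s with
  | nil => rfl
  | cons a t ih =>
    by_cases h : a.2 = best
    · rw [List.takeWhile_cons_of_pos (by simpa using h)]
      simp [pvTake_zad43, h, ih]
    · rw [List.takeWhile_cons_of_neg (by simpa using h)]
      simp [pvTake_zad43, h]

lemma pvZip (l : List Int) : l.dropLast.zip l.tail = l.zip l.tail := by
  induction l with
  | nil => rfl
  | cons x xs ih =>
    cases xs with
    | nil => rfl
    | cons y t =>
      simpa using ih

-- ===== VERDICT (by name: the statement is the Claim_ definition above) =====
theorem zad43_spec : Claim_equal_zad43 := by
  unfold Claim_equal_zad43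
  intro l _ hpre
  show zad43 l = zad43_alt l
  simp only [zad43, zad43_alt]
  -- the gap list, in A's form
  set G : List Int := ((PySem.List.slice l none (some (-1))).zip (PySem.List.slice l (some 1) none)).map
      (fun p => |p.1 - p.2|) with hGdef
  -- B builds the same Counter
  have hG : (l.zip (PySem.List.slice l (some 1) none)).map (fun p => |p.2 - p.1|) = G := by
    rw [hGdef, PySem.List.slice_to_neg_one, PySem.List.slice_from_one, pvZip]
    exact List.map_congr_left (fun p _ => abs_sub_comm _ _)
  have hc : (l.zip (PySem.List.slice l (some 1) none)).foldl
      (fun d p => d.insert (|p.2 - p.1|) (d.getD (|p.2 - p.1|) 0 + 1)) PySem.Dict.empty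
      = PySem.Dict.counter G := by
    rw [← hG, ← PySem.Dict.foldl_insert_getD_add_one_eq_counter, List.foldl_map]
  rw [hc]
  have hGne : G ≠ [] := by
    rw [hGdef, PySem.List.slice_to_neg_one, PySem.List.slice_from_one]
    match l, hpre with
    | a :: b :: r, _ => simp
  rcases h : PySem.List.sorted (PySem.Dict.counter G).items (fun p => p.2) true with _ | ⟨⟨k0, b0⟩, t⟩
  · exfalso
    rw [PySem.List.sorted_eq_nil_iff, PySem.Dict.items_counter, List.map_eq_nil_iff] at h
    rcases List.exists_mem_of_ne_nil G hGne with ⟨g, hg⟩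
    exact (List.eq_nil_iff_forall_not_mem.mp h g) ((PySem.Set.mem_ofList G g).mpr hg)
  · -- head count b0 is an upper bound of all counts
    have hub : ∀ y ∈ (PySem.Dict.counter G).items, y.2 ≤ b0 :=
      PySem.List.key_head_sorted_rev_ge (PySem.Dict.counter G).items (fun p => p.2) h
    have hmem : (k0, b0) ∈ (PySem.Dict.counter G).items := by
      have : (k0, b0) ∈ PySem.List.sorted (PySem.Dict.counter G).items (fun p => p.2) true := by
        rw [h]; exact List.mem_cons_self
      exact (PySem.List.mem_sorted _ _ _ _).mp this
    -- B's max is b0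
    rcases hmax : PySem.List.max? (PySem.Dict.counter G).values (fun v => v) with _ | m
    · exfalso
      rw [PySem.List.max?_eq_none_iff] at hmax
      have : b0 ∈ (PySem.Dict.counter G).values := by
        simp only [PySem.Dict.values]
        exact List.mem_map_of_mem hmem
      rw [hmax] at this
      exact List.not_mem_nil this
    · have hm1 : m ≤ b0 := by
        have hmv := PySem.List.max?_mem hmax
        simp only [PySem.Dict.values, List.mem_map] at hmv
        rcases hmv with ⟨p, hpmem, hpm⟩
        exact hpm ▸ hub p hpmem
      have hm2 : b0 ≤ m := by
        refine PySem.List.max?_isMax hmax b0 ?_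
        simp only [PySem.Dict.values]
        exact List.mem_map_of_mem hmem
      have hmb : m = b0 := le_antisymm hm1 hm2
      -- reduce both sides to the same filter
      rw [hmb]
      show pvTake_zad43 (k0, b0).2 ((k0, b0) :: t)
          = (PySem.Dict.counter G).items.filter (fun p => p.2 == b0)
      have hA : pvTake_zad43 (k0, b0).2 ((k0, b0) :: t)
          = (PySem.Dict.counter G).items.filter (fun p => p.2 == b0) := by
        rw [← h, pvTakeEq, pvTakeWhileFilter (fun p : Int × Int => p.2) b0 _
            (PySem.List.sorted_pairwise_rev _ _)
            (fun y hy => hub y ((PySem.List.mem_sorted _ _ _ _).mp hy)),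
          pvFilterSorted]
      exact hA
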